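-- pv_equiv track=rewrite | github.com/shacrvr/PlottingCode | mictlan.py | gapcount
-- ===== SOURCE A (Python) =====
-- def gapcount(seq):
--     count=0
--     for i in range(len(seq)):
--         if seq[i] == "-":
--             pass
--         else:
--             count+=1
--     return count
-- ===== SOURCE B (Python) =====
-- def gapcount(seq):
--     # Stage 1: build a frequency histogram of all symbols.
--     freq = {}
--     for ch in seq:
--         freq[ch] = freq.get(ch, 0) + 1
--     # Stage 2: sum the multiplicities of every non-gap symbol.
--     total = 0
--     for ch, n in freq.items():
--         if ch != "-":
--             total += n
--     return total
-- ===== Notes on version B (the rewrite author's own statement) =====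
-- stated objective: alternative
-- what changed: Replaces A's per-index accumulation with a two-stage histogram algorithm: first build a dict mapping each symbol to its multiplicity, then sum the multiplicities of all non-gap keys.
import Mathlib
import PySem

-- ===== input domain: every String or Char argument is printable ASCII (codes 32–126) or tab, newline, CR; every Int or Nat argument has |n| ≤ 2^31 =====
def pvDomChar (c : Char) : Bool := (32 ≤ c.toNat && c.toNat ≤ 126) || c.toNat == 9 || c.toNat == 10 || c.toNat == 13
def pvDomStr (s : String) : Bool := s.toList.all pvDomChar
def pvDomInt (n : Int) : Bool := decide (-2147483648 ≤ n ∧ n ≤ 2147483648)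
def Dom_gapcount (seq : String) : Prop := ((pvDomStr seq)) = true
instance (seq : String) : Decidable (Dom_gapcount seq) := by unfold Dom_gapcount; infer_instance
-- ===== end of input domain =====

-- B replaces A's per-index accumulation with a two-stage histogram: build a symbol→multiplicity
-- dict, then sum the multiplicities of all non-gap keys; objective: alternative (same O(n) cost).

-- ===== PORT A =====
-- for i in range(len(seq)): if seq[i] == "-": pass else: count += 1
def gapcount (seq : String) : Int :=
  (PySem.List.pyRange 0 (PySem.Str.len seq) 1).foldl
    (fun count i =>
      match PySem.Str.pyGet? seq i with
      | some c => if c == '-' then count else count + 1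
      | none => count)   -- unreachable: i is always in range
    0

-- ===== PORT B =====
-- freq = {}; for ch in seq: freq[ch] = freq.get(ch, 0) + 1
-- total = 0; for ch, n in freq.items(): if ch != "-": total += n; return total
def gapcount_alt (seq : String) : Int :=
  let freq : PySem.Dict Char Int :=
    seq.toList.foldl (fun d ch => d.insert ch (d.getD ch 0 + 1)) PySem.Dict.empty
  freq.items.foldl (fun total p => if p.1 != '-' then total + p.2 else total) 0

-- ===== PRECONDITION & SPEC =====
def Spec_gapcount (seq : String) (out : Int) : Prop := out = gapcount_alt seq
instance (seq : String) (out : Int) : Decidable (Spec_gapcount seq out) := by unfold Spec_gapcount; infer_instance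

-- ===== CLAIM (what is proved, stated in full; the proofs are below) =====
def Claim_equal_gapcount : Prop := ∀ (seq : String), Dom_gapcount seq → Spec_gapcount seq (gapcount seq)

-- ===== LEMMAS AND PROOFS =====

-- A's loop over the character list accumulates length minus gap count.
theorem foldl_nongap (l : List Char) (a : Int) :
    l.foldl (fun count c => if c == '-' then count else count + 1) a
      = a + l.length - l.count '-' := by
  induction l generalizing a with
  | nil => simp
  | cons h t ih =>
    simp only [List.foldl_cons, List.count_cons, ih]
    by_cases hc : h = '-' <;> simp [hc] <;> ring

-- indicator sums over a Nodup key list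
theorem sum_indicator_zero (S : List Char) (x : Char) (hx : x ∉ S) :
    (S.map (fun k => if x = k then (1 : Int) else 0)).sum = 0 := by
  induction S with
  | nil => simp
  | cons a S' ih =>
    have hxa : x ≠ a := fun h => hx (h ▸ List.mem_cons_self)
    have hxS' : x ∉ S' := fun h => hx (List.mem_cons_of_mem _ h)
    simp [hxa, ih hxS']

theorem sum_indicator_one (S : List Char) (x : Char) (hnd : S.Nodup) (hx : x ∈ S) :
    (S.map (fun k => if x = k then (1 : Int) else 0)).sum = 1 := by
  induction S with
  | nil => simp at hx
  | cons a S' ih =>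
    rcases List.mem_cons.mp hx with h | h
    · subst h
      simp [sum_indicator_zero S' x (List.nodup_cons.mp hnd).1]
    · have hxa : x ≠ a := fun he => (List.nodup_cons.mp hnd).1 (he ▸ h)
      simp [hxa, ih (List.nodup_cons.mp hnd).2 h]

-- The histogram sum over any Nodup key list covering l equals l's non-gap count.
theorem sum_if_count (S : List Char) (l : List Char) (hnd : S.Nodup)
    (hcov : ∀ x ∈ l, x ∈ S) :
    (S.map (fun k => if k = '-' then (0 : Int) else (l.count k : Int))).sum
      = (l.length : Int) - (l.count '-' : Int) := by
  induction l with
  | nil => simp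
  | cons x t ih =>
    have hsplit :
        (fun k => if k = '-' then (0 : Int) else (((x :: t).count k : Nat) : Int))
          = fun k => (if k = '-' then (0 : Int) else (t.count k : Int))
              + (if k = '-' then (0 : Int) else if x = k then 1 else 0) := by
      funext k
      by_cases hk : k = '-' <;> by_cases hxk : x = k <;>
        simp [hk, hxk, List.count_cons] <;> push_cast <;> ring
    rw [hsplit, List.sum_map_add,
      ih (fun y hy => hcov y (List.mem_cons_of_mem _ hy))]
    by_cases hx : x = '-'
    · have hz : (fun k => if k = '-' then (0 : Int) else if x = k then 1 else 0)
          = fun _ => (0 : Int) := by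
        funext k
        by_cases hk : k = '-'
        · simp [hk]
        · have h2 : x ≠ k := by rw [hx]; exact fun h => hk h.symm
          simp [hk, h2]
      rw [hz]
      simp [List.count_cons, hx]
    · have hind : (fun k => if k = '-' then (0 : Int) else if x = k then 1 else 0)
          = fun k => if x = k then (1 : Int) else 0 := by
        funext k
        by_cases hk : k = '-'
        · have h2 : x ≠ k := fun h => hx (hk ▸ h)
          simp [hk, h2, hx]
        · simp [hk]
      rw [hind, sum_indicator_one S x hnd (hcov x List.mem_cons_self)]
      have : (x :: t).count '-' = t.count '-' := by
        simp [List.count_cons, Ne.symm hx, hx]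
      rw [this]
      simp; push_cast; ring

-- B's second loop is the sum of the non-gap multiplicities.
theorem foldl_condadd (L : List (Char × Int)) (a : Int) :
    L.foldl (fun total p => if p.1 != '-' then total + p.2 else total) a
      = a + (L.map (fun p => if p.1 = '-' then (0 : Int) else p.2)).sum := by
  induction L generalizing a with
  | nil => simp
  | cons p t ih =>
    rw [List.foldl_cons, ih]
    by_cases hp : p.1 = '-' <;> simp [hp] <;> ring

-- ===== VERDICT (by name: the statement is the Claim_ definition above) =====
theorem gapcount_spec : Claim_equal_gapcount := by
  intro seq _
  unfold Spec_gapcount gapcount gapcount_alt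
  -- A's side: reduce the indexed loop to a fold over the characters.
  have hbody :
      (PySem.List.pyRange 0 (PySem.Str.len seq) 1).foldl
        (fun count i =>
          match PySem.Str.pyGet? seq i with
          | some c => if c == '-' then count else count + 1
          | none => count) 0
      = (PySem.List.pyRange 0 ((seq.toList.length : Int)) 1).foldl
          (fun count i =>
            (fun (acc : Int) (c : Char) => if c == '-' then acc else acc + 1) count
              (PySem.List.pyGetD seq.toList i ' ')) 0 := by
    apply PySem.List.foldl_congr_mem
    intro acc i hi
    rw [PySem.List.mem_pyRange_one] at hi
    simp only [PySem.Str.len_eq] at hi ⊢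
    obtain ⟨n, rfl⟩ : ∃ n : Nat, i = (n : Int) := ⟨i.toNat, (Int.toNat_of_nonneg hi.1).symm⟩
    have hn : n < seq.toList.length := by exact_mod_cast hi.2
    simp [PySem.List.pyGetD_natCast, List.getElem?_eq_getElem hn]
  have hA :
      (PySem.List.pyRange 0 (PySem.Str.len seq) 1).foldl
        (fun count i =>
          match PySem.Str.pyGet? seq i with
          | some c => if c == '-' then count else count + 1
          | none => count) 0 = (seq.toList.length : Int) - (seq.toList.count '-' : Int) := by
    rw [hbody,
      PySem.List.foldl_pyRange_zero_pyGetD' seq.toList ' '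
        (fun (acc : Int) (c : Char) => if c == '-' then acc else acc + 1) 0,
      foldl_nongap]
    ring
  -- B's side: histogram = counter, items = distinct keys with their counts.
  have hfreq : seq.toList.foldl (fun d ch => d.insert ch (d.getD ch 0 + 1)) PySem.Dict.empty
      = PySem.Dict.counter seq.toList := PySem.Dict.foldl_insert_getD_add_one_eq_counter seq.toList
  rw [hA]
  simp only [hfreq, foldl_condadd, PySem.Dict.items_counter, List.map_map, zero_add]
  rw [show ((fun p : Char × Int => if p.1 = '-' then (0 : Int) else p.2) ∘
        fun k => (k, (seq.toList.count k : Int)))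
      = fun k => if k = '-' then (0 : Int) else (seq.toList.count k : Int) from rfl]
  exact (sum_if_count (PySem.Set.ofList seq.toList) seq.toList (PySem.Set.nodup_ofList seq.toList)
    (fun x hx => (PySem.Set.mem_ofList seq.toList x).mpr hx)).symm
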